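-- pv_equiv track=rewrite | github.com/mathurk29/leetcode | array/moveNegativeToRight.py | way1
-- ===== SOURCE A (Python) =====
-- def way1(nums):
--     positive = []
--     negative = []
--     for num in nums:
--         if num >= 0:
--             positive.append(num)
--         else:
--             negative.append(num)
--     positive.extend(negative)
--     return positive
-- ===== SOURCE B (Python) =====
-- def way1(nums):
--     # Stable sort by the boolean key "is negative": non-negatives (False) first,
--     # negatives (True) after, each group keeping its original relative order.
--     return sorted(nums, key=lambda x: x < 0)
-- ===== Notes on version B (the rewrite author's own statement) =====
-- stated objective: idiomatic
-- what changed: Replaces the two-accumulator scan-and-concatenate with a single stable sort keyed by the boolean 'is negative', relying on sort stability for the relative order.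
import Mathlib
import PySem

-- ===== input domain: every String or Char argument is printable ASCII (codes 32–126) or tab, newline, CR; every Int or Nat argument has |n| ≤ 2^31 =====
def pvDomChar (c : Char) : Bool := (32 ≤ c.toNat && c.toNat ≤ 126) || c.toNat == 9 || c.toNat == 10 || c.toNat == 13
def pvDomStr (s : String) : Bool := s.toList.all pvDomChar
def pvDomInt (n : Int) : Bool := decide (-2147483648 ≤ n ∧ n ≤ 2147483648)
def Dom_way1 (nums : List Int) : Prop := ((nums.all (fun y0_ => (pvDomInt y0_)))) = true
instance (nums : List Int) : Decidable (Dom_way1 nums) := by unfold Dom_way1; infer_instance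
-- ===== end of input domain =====

-- B replaces A's two-accumulator scan with one stable sort keyed by "is negative" (idiomatic; same return value).

-- ===== PORT A =====
def way1 (nums : List Int) : List Int :=
  let r := nums.foldl
    (fun (acc : List Int × List Int) num =>
      if num ≥ 0 then (acc.1 ++ [num], acc.2) else (acc.1, acc.2 ++ [num]))
    ([], [])
  r.1 ++ r.2

-- ===== PORT B =====
def way1_alt (nums : List Int) : List Int :=
  PySem.List.sorted nums (fun x => decide (x < 0))

-- ===== PRECONDITION & SPEC =====
def Spec_way1 (nums : List Int) (out : List Int) : Prop := out = way1_alt nums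
instance (nums : List Int) (out : List Int) : Decidable (Spec_way1 nums out) := by unfold Spec_way1; infer_instance

-- ===== CLAIM (what is proved, stated in full; the proofs are below) =====
def Claim_equal_way1 : Prop := ∀ (nums : List Int), Dom_way1 nums → Spec_way1 nums (way1 nums)

-- ===== LEMMAS AND PROOFS =====

-- A's loop with general accumulators: it appends the non-negative and negative filters.
theorem way1_loop (nums p n : List Int) :
    nums.foldl
      (fun (acc : List Int × List Int) num =>
        if num ≥ 0 then (acc.1 ++ [num], acc.2) else (acc.1, acc.2 ++ [num]))
      (p, n)
    = (p ++ nums.filter (fun x => decide (0 ≤ x)), n ++ nums.filter (fun x => decide (x < 0))) := by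
  induction nums generalizing p n with
  | nil => simp
  | cons x rest ih =>
    by_cases hx : 0 ≤ x
    · simp [List.foldl, hx, ih, show ¬ x < 0 by omega]
    · simp [List.foldl, hx, ih, show x < 0 by omega]

-- insertBy skips over a prefix it never goes before
theorem insertBy_append_left (before : Int → Int → Bool) (x : Int) (p n : List Int)
    (hp : ∀ y ∈ p, before x y = false) :
    PySem.List.insertBy before x (p ++ n) = p ++ PySem.List.insertBy before x n := by
  induction p with
  | nil => simp
  | cons a p ih =>
    have h := hp a (by simp)
    simp only [List.cons_append, PySem.List.insertBy, h, Bool.false_eq_true, if_false]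
    rw [ih (fun y hy => hp y (by simp [hy]))]

-- B's loop (stable insertion sort by the boolean key) keeps the same two blocks.
theorem alt_loop (nums p n : List Int)
    (hp : ∀ y ∈ p, ¬ y < 0) (hn : ∀ y ∈ n, y < 0) :
    nums.foldl
      (fun acc x =>
        PySem.List.insertBy
          (fun a b => decide ((decide (a < 0) : Bool) < (decide (b < 0) : Bool))) x acc)
      (p ++ n)
    = (p ++ nums.filter (fun x => decide (0 ≤ x))) ++ (n ++ nums.filter (fun x => decide (x < 0))) := by
  induction nums generalizing p n with
  | nil => simp
  | cons x rest ih =>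
    by_cases hx : 0 ≤ x
    · have hins : PySem.List.insertBy
          (fun a b => decide ((decide (a < 0) : Bool) < (decide (b < 0) : Bool))) x (p ++ n)
          = (p ++ [x]) ++ n := by
        rw [insertBy_append_left _ _ _ _ (fun y hy => by
          simp [show ¬ x < 0 by omega, show ¬ y < 0 from hp y hy])]
        cases n with
        | nil => simp [PySem.List.insertBy]
        | cons b m =>
          simp [PySem.List.insertBy, show ¬ x < 0 by omega, hn b (by simp), Bool.lt_iff]
      have := ih (p ++ [x]) n
        (fun y hy => by rcases List.mem_append.mp hy with h | h
                        · exact hp y h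
                        · simp at h; omega)
        hn
      simp only [List.foldl, hins, this]
      simp [hx, show ¬ x < 0 by omega, List.append_assoc]
    · have hins : PySem.List.insertBy
          (fun a b => decide ((decide (a < 0) : Bool) < (decide (b < 0) : Bool))) x (p ++ n)
          = p ++ (n ++ [x]) := by
        rw [PySem.List.insertBy_of_forall_not_before _ _ _ (fun y hy => by
          simp [show x < 0 by omega, Bool.lt_iff])]
        simp
      have := ih p (n ++ [x]) hp
        (fun y hy => by rcases List.mem_append.mp hy with h | h
                        · exact hn y h
                        · simp at h; omega)
      simp only [List.foldl, hins, this]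
      simp [hx, show x < 0 by omega, List.append_assoc]

theorem way1_eq_alt (nums : List Int) : way1 nums = way1_alt nums := by
  have hA := way1_loop nums [] []
  have hB := alt_loop nums [] [] (by simp) (by simp)
  simp only [List.nil_append] at hA hB
  rw [way1, way1_alt, PySem.List.sorted_eq_foldl_insertBy, hB, hA]

-- ===== VERDICT (by name: the statement is the Claim_ definition above) =====
theorem way1_spec : Claim_equal_way1 := by
  intro nums _
  exact way1_eq_alt nums
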